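-- pv_equiv track=rewrite | github.com/mischaikow/advent_of_code | 2015/24_code.py | remainder_three_split
-- ===== SOURCE A (Python) =====
-- def remainder_split(possibility, packages, target):
--     left_side_group = [[]]
--     for ap in packages:
--         if ap in possibility:
--             continue
--         new_additions = []
--         for group in left_side_group:
--             new_group = group.copy()
--             new_group.append(ap)
--             if sum(new_group) < target:
--                 new_additions.append(new_group)
--             if sum(new_group) == target:
--                 return True
--         left_side_group += new_additions
--     return False
--
-- def remainder_three_split(possibility, packages, target):
--     right_side_group = [[]]
--     for ap in packages:
--         if ap in possibility:
--             continue
--         new_additions = []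
--         for group in right_side_group:
--             new_group = group.copy()
--             new_group.append(ap)
--             if sum(new_group) < target:
--                 new_additions.append(new_group)
--             if sum(new_group) == target:
--                 if remainder_split(possibility + new_group, packages, target):
--                     return True
--         right_side_group += new_additions
--     return False
-- ===== SOURCE B (Python) =====
-- def remainder_three_split(possibility, packages, target):
--     items = [x for x in packages if x not in possibility]
--
--     def fillable(used):
--         # subset-sum reachability DP: can the items whose value is not in
--         # `used` form a group reaching exactly `target`, every partial sum
--         # staying below target?
--         sums = {0}
--         for x in items:
--             if x in used:
--                 continue
--             fresh = set()
--             for s in sums: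
--                 t = s + x
--                 if t == target:
--                     return True
--                 if t < target:
--                     fresh.add(t)
--             sums |= fresh
--         return False
--
--     def dfs(rest, s, used):
--         # pick the first group by take/skip recursion, carrying only its sum
--         # and the list of values it uses
--         if not rest:
--             return False
--         x, rest2 = rest[0], rest[1:]
--         t = s + x
--         if t == target and fillable(used + [x]):
--             return True
--         if t < target and dfs(rest2, t, used + [x]):
--             return True
--         return dfs(rest2, s, used)
--
--     return dfs(items, 0, [])
-- ===== Notes on version B (the rewrite author's own statement) =====
-- stated objective: alternative
-- what changed: A's breadth-first enumeration that stores every partial group as an explicit list (and re-runs the same list-of-groups enumeration for the second group) is replaced by a take/skip recursion carrying only the running sum and the used values for the first group, and a subset-sum reachability DP over a set of partial sums for each second-group check.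
import Mathlib
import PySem

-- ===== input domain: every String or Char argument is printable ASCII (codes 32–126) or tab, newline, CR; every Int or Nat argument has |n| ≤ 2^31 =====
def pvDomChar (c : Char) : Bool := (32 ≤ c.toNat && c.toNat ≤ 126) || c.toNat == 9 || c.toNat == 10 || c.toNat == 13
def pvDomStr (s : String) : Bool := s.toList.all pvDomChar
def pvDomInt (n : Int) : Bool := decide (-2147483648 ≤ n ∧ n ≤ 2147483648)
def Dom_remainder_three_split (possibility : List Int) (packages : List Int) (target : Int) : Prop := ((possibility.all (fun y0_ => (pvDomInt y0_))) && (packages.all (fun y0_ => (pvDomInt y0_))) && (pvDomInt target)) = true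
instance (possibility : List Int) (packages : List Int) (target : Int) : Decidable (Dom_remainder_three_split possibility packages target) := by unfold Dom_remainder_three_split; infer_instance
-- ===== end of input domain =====

-- B replaces A's breadth-first enumeration over explicit group lists by a take/skip
-- recursion carrying only (sum, used values) for the first group and a subset-sum
-- reachability DP over a set of partial sums for the second group (alternative structure).

-- ===== PORT A =====
def rsInner (target x : Int) : List (List Int) → List (List Int) → Option (List (List Int))
  | [], acc => some acc
  | g :: gs, acc =>
    let ng := g ++ [x]
    let acc' := if ng.sum < target then acc ++ [ng] else acc
    if ng.sum == target then none else rsInner target x gs acc'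

def rsLoop (poss : List Int) (target : Int) : List Int → List (List Int) → Bool
  | [], _ => false
  | ap :: rest, L =>
    if poss.contains ap then rsLoop poss target rest L
    else
      match rsInner target ap L [] with
      | none => true
      | some adds => rsLoop poss target rest (L ++ adds)

def remainder_split (possibility packages : List Int) (target : Int) : Bool :=
  rsLoop possibility target packages [[]]

def r3Inner (poss packages : List Int) (target x : Int) : List (List Int) → List (List Int) → Option (List (List Int))
  | [], acc => some acc
  | g :: gs, acc =>
    let ng := g ++ [x]
    let acc' := if ng.sum < target then acc ++ [ng] else acc
    if ng.sum == target && remainder_split (poss ++ ng) packages target then none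
    else r3Inner poss packages target x gs acc'

def r3Loop (poss packages : List Int) (target : Int) : List Int → List (List Int) → Bool
  | [], _ => false
  | ap :: rest, L =>
    if poss.contains ap then r3Loop poss packages target rest L
    else
      match r3Inner poss packages target ap L [] with
      | none => true
      | some adds => r3Loop poss packages target rest (L ++ adds)

def remainder_three_split (possibility : List Int) (packages : List Int) (target : Int) : Bool :=
  r3Loop possibility packages target packages [[]]

-- ===== PORT B =====
def fillInner (target x : Int) : List Int → PySem.Set Int → Option (PySem.Set Int)
  | [], fresh => some fresh
  | s :: ss, fresh =>
    if s + x == target then none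
    else fillInner target x ss (if s + x < target then PySem.Set.add fresh (s + x) else fresh)

def fillLoop (target : Int) (used : List Int) : List Int → PySem.Set Int → Bool
  | [], _ => false
  | x :: rest, sums =>
    if used.contains x then fillLoop target used rest sums
    else
      match fillInner target x sums PySem.Set.empty with
      | none => true
      | some fresh => fillLoop target used rest (PySem.Set.union sums fresh)

def fillable (items : List Int) (target : Int) (used : List Int) : Bool :=
  fillLoop target used items (PySem.Set.ofList [0])

def dfsB (items : List Int) (target : Int) : List Int → Int → List Int → Bool
  | [], _, _ => false
  | x :: rest, s, used =>
    if s + x == target && fillable items target (used ++ [x]) then true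
    else if s + x < target && dfsB items target rest (s + x) (used ++ [x]) then true
    else dfsB items target rest s used

def remainder_three_split_alt (possibility : List Int) (packages : List Int) (target : Int) : Bool :=
  let items := packages.filter (fun x => !possibility.contains x)
  dfsB items target items 0 []


-- ===== PRECONDITION & SPEC =====
def Spec_remainder_three_split (possibility : List Int) (packages : List Int) (target : Int) (out : Bool) : Prop := out = remainder_three_split_alt possibility packages target
instance (possibility : List Int) (packages : List Int) (target : Int) (out : Bool) : Decidable (Spec_remainder_three_split possibility packages target out) := by unfold Spec_remainder_three_split; infer_instance

-- ===== CLAIM (what is proved, stated in full; the proofs are below) =====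
def Claim_equal_remainder_three_split : Prop := ∀ (possibility : List Int) (packages : List Int) (target : Int), Dom_remainder_three_split possibility packages target → Spec_remainder_three_split possibility packages target (remainder_three_split possibility packages target)

-- ===== LEMMAS AND PROOFS =====

-- skip-free versions of the three loops (proof helpers)
def rsLoopNF (target : Int) : List Int → List (List Int) → Bool
  | [], _ => false
  | ap :: rest, L =>
    match rsInner target ap L [] with
    | none => true
    | some adds => rsLoopNF target rest (L ++ adds)

def r3LoopNF (poss packages : List Int) (target : Int) : List Int → List (List Int) → Bool
  | [], _ => false
  | ap :: rest, L =>
    match r3Inner poss packages target ap L [] with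
    | none => true
    | some adds => r3LoopNF poss packages target rest (L ++ adds)

def fillLoopNF (target : Int) : List Int → PySem.Set Int → Bool
  | [], _ => false
  | x :: rest, sums =>
    match fillInner target x sums PySem.Set.empty with
    | none => true
    | some fresh => fillLoopNF target rest (PySem.Set.union sums fresh)

theorem any_or_distrib {α : Type} (l : List α) (f g : α → Bool) :
    l.any (fun a => f a || g a) = (l.any f || l.any g) := by
  induction l with
  | nil => simp
  | cons a l ih => simp [ih, Bool.or_assoc, Bool.or_left_comm]

theorem rsInner_eq (target x : Int) : ∀ (gs acc : List (List Int)),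
    rsInner target x gs acc =
      if gs.any (fun g => (g ++ [x]).sum == target) then none
      else some (acc ++ (gs.filter (fun g => decide ((g ++ [x]).sum < target))).map (fun g => g ++ [x])) := by
  intro gs
  induction gs with
  | nil => intro acc; simp [rsInner]
  | cons g gs ih =>
    intro acc
    simp only [rsInner, List.any_cons, List.filter_cons]
    by_cases h1 : g.sum + x = target
    · simp [h1]
    · by_cases h2 : g.sum + x < target
      · simp [h1, h2, ih]
      · simp [h1, h2, ih]

theorem r3Inner_eq (poss packages : List Int) (target x : Int) : ∀ (gs acc : List (List Int)),
    r3Inner poss packages target x gs acc =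
      if gs.any (fun g => (g ++ [x]).sum == target && remainder_split (poss ++ (g ++ [x])) packages target) then none
      else some (acc ++ (gs.filter (fun g => decide ((g ++ [x]).sum < target))).map (fun g => g ++ [x])) := by
  intro gs
  induction gs with
  | nil => intro acc; simp [r3Inner]
  | cons g gs ih =>
    intro acc
    simp only [r3Inner, List.any_cons, List.filter_cons]
    by_cases h1 : g.sum + x = target ∧ remainder_split (poss ++ (g ++ [x])) packages target = true
    · simp [h1.1, h1.2]
    · by_cases h2 : g.sum + x < target
      · simp only [List.sum_append, List.sum_cons, List.sum_nil, add_zero] at h1 ⊢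
        simp [h2, ih, h1]
      · simp only [List.sum_append, List.sum_cons, List.sum_nil, add_zero] at h1 ⊢
        simp [h2, ih, h1]

theorem fillInner_eq (target x : Int) : ∀ (ss : List Int) (fresh : PySem.Set Int),
    fillInner target x ss fresh =
      if ss.any (fun s => s + x == target) then none
      else some (ss.foldl (fun f s => if s + x < target then PySem.Set.add f (s + x) else f) fresh) := by
  intro ss
  induction ss with
  | nil => intro fresh; simp [fillInner]
  | cons s ss ih =>
    intro fresh
    simp only [fillInner, List.any_cons, List.foldl_cons]
    by_cases h1 : (s + x == target) = true
    · simp [h1]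
    · simp [h1, ih]

theorem mem_fillFold (target x : Int) : ∀ (ss : List Int) (f0 : PySem.Set Int) (v : Int),
    v ∈ ss.foldl (fun f s => if s + x < target then PySem.Set.add f (s + x) else f) f0 ↔
      v ∈ f0 ∨ ∃ s ∈ ss, s + x < target ∧ s + x = v := by
  intro ss
  induction ss with
  | nil => intro f0 v; simp
  | cons s ss ih =>
    intro f0 v
    simp only [List.foldl_cons]
    by_cases h : s + x < target
    · rw [ih]
      simp [h, PySem.Set.mem_add]
      tauto
    · rw [ih]
      simp [h]

theorem rsLoop_filter (poss : List Int) (target : Int) : ∀ (lst : List Int) (L : List (List Int)),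
    rsLoop poss target lst L = rsLoopNF target (lst.filter (fun a => !poss.contains a)) L := by
  intro lst
  induction lst with
  | nil => intro L; rfl
  | cons a lst ih =>
    intro L
    by_cases h : a ∈ poss
    · simp [rsLoop, List.filter_cons, h, ih]
    · simp only [rsLoop, List.filter_cons, h, ih, List.contains_eq_mem, decide_false, decide_true,
        Bool.not_false, Bool.not_true, if_true, if_false, Bool.false_eq_true, Bool.true_eq_false, ite_false, ite_true]
      rw [rsLoopNF]

theorem r3Loop_filter (poss packages : List Int) (target : Int) : ∀ (lst : List Int) (L : List (List Int)),
    r3Loop poss packages target lst L = r3LoopNF poss packages target (lst.filter (fun a => !poss.contains a)) L := by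
  intro lst
  induction lst with
  | nil => intro L; rfl
  | cons a lst ih =>
    intro L
    by_cases h : a ∈ poss
    · simp [r3Loop, List.filter_cons, h, ih]
    · simp only [r3Loop, List.filter_cons, h, ih, List.contains_eq_mem, decide_false, decide_true,
        Bool.not_false, Bool.not_true, if_true, if_false, Bool.false_eq_true, Bool.true_eq_false, ite_false, ite_true]
      rw [r3LoopNF]

theorem fillLoop_filter (used : List Int) (target : Int) : ∀ (lst : List Int) (L : PySem.Set Int),
    fillLoop target used lst L = fillLoopNF target (lst.filter (fun a => !used.contains a)) L := by
  intro lst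
  induction lst with
  | nil => intro L; rfl
  | cons a lst ih =>
    intro L
    by_cases h : a ∈ used
    · simp [fillLoop, List.filter_cons, h, ih]
    · simp only [fillLoop, List.filter_cons, h, ih, List.contains_eq_mem, decide_false, decide_true,
        Bool.not_false, Bool.not_true, if_true, if_false, Bool.false_eq_true, Bool.true_eq_false, ite_false, ite_true]
      rw [fillLoopNF]

theorem core2 (target : Int) : ∀ (xs : List Int) (L : List (List Int)) (S : PySem.Set Int),
    (∀ v : Int, v ∈ S ↔ ∃ g ∈ L, g.sum = v) →
    rsLoopNF target xs L = fillLoopNF target xs S := by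
  intro xs
  induction xs with
  | nil => intro L S hinv; rfl
  | cons x xs ih =>
    intro L S hinv
    rw [rsLoopNF, fillLoopNF, rsInner_eq, fillInner_eq]
    have hcond : (L.any fun g => (g ++ [x]).sum == target) = (S.any fun s => s + x == target) := by
      rw [Bool.eq_iff_iff, List.any_eq_true, List.any_eq_true]
      constructor
      · rintro ⟨g, hg, hgt⟩
        exact ⟨g.sum, (hinv g.sum).2 ⟨g, hg, rfl⟩, by simpa using hgt⟩
      · rintro ⟨s, hs, hst⟩
        obtain ⟨g, hg, hgs⟩ := (hinv s).1 hs
        exact ⟨g, hg, by simp [hgs]; simpa using hst⟩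
    rw [hcond]
    by_cases hc : (S.any fun s => s + x == target) = true
    · simp [hc]
    · simp only [hc, Bool.false_eq_true, if_false]
      apply ih
      intro v
      rw [PySem.Set.mem_union, mem_fillFold]
      constructor
      · rintro (hv | hv | hv)
        · obtain ⟨g, hg, hgs⟩ := (hinv v).1 hv
          exact ⟨g, List.mem_append_left _ hg, hgs⟩
        · simp at hv
        · obtain ⟨s, hs, hlt, heq⟩ := hv
          obtain ⟨g, hg, hgs⟩ := (hinv s).1 hs
          exact ⟨g ++ [x], List.mem_append_right _ (List.mem_map.2
            ⟨g, List.mem_filter.2 ⟨hg, by simp [hgs, hlt]⟩, rfl⟩), by simp [hgs, heq]⟩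
      · rintro ⟨g, hg, hgs⟩
        rcases List.mem_append.1 hg with hgL | hgA
        · exact Or.inl ((hinv v).2 ⟨g, hgL, hgs⟩)
        · obtain ⟨g0, hmem, rfl⟩ := List.mem_map.1 hgA
          obtain ⟨hg0, hlt⟩ := List.mem_filter.1 hmem
          refine Or.inr (Or.inr ⟨g0.sum, (hinv g0.sum).2 ⟨g0, hg0, rfl⟩, ?_, ?_⟩)
          · simpa using hlt
          · simpa using hgs

theorem split_eq_fillable (poss packages : List Int) (target : Int) (u : List Int) :
    remainder_split (poss ++ u) packages target =
      fillable (packages.filter (fun a => !poss.contains a)) target u := by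
  unfold remainder_split fillable
  rw [rsLoop_filter, fillLoop_filter]
  have hlist : packages.filter (fun a => !(poss ++ u).contains a) =
      (packages.filter (fun a => !poss.contains a)).filter (fun a => !u.contains a) := by
    rw [List.filter_filter]
    apply List.filter_congr
    intro a _
    simp only [List.contains_eq_mem, List.mem_append]
    by_cases h1 : a ∈ poss <;> by_cases h2 : a ∈ u <;> simp [h1, h2]
  rw [hlist]
  apply core2
  intro v
  simp [PySem.Set.ofList, PySem.Set.add, PySem.Set.empty, eq_comm]

theorem core1 (poss packages : List Int) (target : Int) : ∀ (xs : List Int) (L : List (List Int)),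
    r3LoopNF poss packages target xs L =
      L.any (fun g => dfsB (packages.filter (fun a => !poss.contains a)) target xs g.sum g) := by
  intro xs
  induction xs with
  | nil => intro L; simp [r3LoopNF, dfsB]
  | cons x xs ih =>
    intro L
    rw [r3LoopNF, r3Inner_eq]
    by_cases hc : (L.any fun g => (g ++ [x]).sum == target &&
        remainder_split (poss ++ (g ++ [x])) packages target) = true
    · rw [if_pos hc]
      show true = _
      obtain ⟨g, hg, hgt⟩ := List.any_eq_true.1 hc
      symm
      apply List.any_eq_true.2
      refine ⟨g, hg, ?_⟩
      rw [Bool.and_eq_true] at hgt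
      have hfill : fillable (packages.filter (fun a => !poss.contains a)) target (g ++ [x]) = true := by
        rw [← split_eq_fillable]; exact hgt.2
      simp only [dfsB]
      rw [if_pos]
      rw [Bool.and_eq_true]
      refine ⟨by simpa using hgt.1, hfill⟩
    · rw [if_neg hc]
      show r3LoopNF poss packages target xs
        (L ++ ([] ++ (L.filter (fun g => decide ((g ++ [x]).sum < target))).map (fun g => g ++ [x]))) = _
      rw [List.nil_append, ih, List.any_append]
      have hadds : ((L.filter (fun g => decide ((g ++ [x]).sum < target))).map (fun g => g ++ [x])).any
            (fun g => dfsB (packages.filter (fun a => !poss.contains a)) target xs g.sum g)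
          = L.any (fun g => decide (g.sum + x < target) &&
              dfsB (packages.filter (fun a => !poss.contains a)) target xs (g.sum + x) (g ++ [x])) := by
        rw [List.any_map, List.any_filter]
        apply PySem.List.any_congr_mem
        intro g _
        simp
      rw [hadds, ← any_or_distrib]
      refine PySem.List.any_congr_mem ?_
      intro g hgL
      have hp : ¬ ((g ++ [x]).sum == target && remainder_split (poss ++ (g ++ [x])) packages target) = true :=
        fun hpg => hc (List.any_eq_true.2 ⟨g, hgL, hpg⟩)
      rw [split_eq_fillable] at hp
      simp only [List.sum_append, List.sum_cons, List.sum_nil, add_zero] at hp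
      simp only [dfsB]
      rw [if_neg (by simpa using hp)]
      by_cases h2 : g.sum + x < target
      · cases hdf : dfsB (packages.filter (fun a => !poss.contains a)) target xs (g.sum + x) (g ++ [x]) <;>
          simp [h2, hdf]
      · simp [h2]

theorem remainder_three_split_spec : Claim_equal_remainder_three_split := by
  intro possibility packages target _
  unfold Spec_remainder_three_split remainder_three_split remainder_three_split_alt
  rw [r3Loop_filter, core1]
  simp
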